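-- pv_equiv track=rewrite | github.com/Shkitskiy94/Algorithms | Tinkoff/first_case.py | search_for_ugly_words
-- ===== SOURCE A (Python) =====
-- def search_for_ugly_words(len_str: int, right_str: str, left_str: str) -> int:
--     count = 0
--     result = ''
--     for i in range(len_str):
--         if right_str[i] == ' ':
--             result += right_str[i]
--         else:
--             result += left_str[i]
--     list_result = result.split(' ')
--     for i in range(len(list_result)):
--         if 'BB' in list_result[i]:
--             count += 1
--         elif 'YY' in list_result[i]:
--             count += 1
--         else:
--             count += 0
--     return count
-- ===== SOURCE B (Python) =====
-- def search_for_ugly_words(len_str: int, right_str: str, left_str: str) -> int: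
--     # One pass: merge char-by-char, track the previous merged char and an
--     # "ugly" flag per word; finalize the last word after the loop.
--     count = 0
--     flag = False
--     prev = None
--     for i in range(len_str):
--         c = ' ' if right_str[i] == ' ' else left_str[i]
--         if c == ' ':
--             if flag:
--                 count += 1
--             flag = False
--             prev = None
--         else:
--             if prev == c and (c == 'B' or c == 'Y'):
--                 flag = True
--             prev = c
--     if flag:
--         count += 1
--     return count
-- ===== Notes on version B (the rewrite author's own statement) =====
-- stated objective: simpler
-- what changed: Instead of building the merged string, splitting it on spaces and rescanning every word for 'BB'/'YY' substrings, B counts in a single pass over range(len_str), tracking the previous merged char and a per-word ugly flag that is finalized at each space and after the loop.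
import Mathlib
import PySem

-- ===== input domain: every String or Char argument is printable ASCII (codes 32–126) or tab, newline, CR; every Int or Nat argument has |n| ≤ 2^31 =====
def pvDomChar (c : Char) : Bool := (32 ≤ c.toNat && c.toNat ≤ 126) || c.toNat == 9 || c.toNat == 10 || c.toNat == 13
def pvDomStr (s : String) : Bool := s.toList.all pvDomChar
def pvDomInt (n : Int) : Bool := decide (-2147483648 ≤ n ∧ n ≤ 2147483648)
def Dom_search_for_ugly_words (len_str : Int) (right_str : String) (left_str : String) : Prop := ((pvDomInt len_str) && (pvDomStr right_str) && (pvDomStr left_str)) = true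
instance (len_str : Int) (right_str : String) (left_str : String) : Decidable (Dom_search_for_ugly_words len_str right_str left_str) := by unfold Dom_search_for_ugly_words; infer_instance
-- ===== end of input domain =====

-- B replaces A's build-merged-string + split + rescan with a single pass that
-- tracks the previous merged char and a per-word "ugly" flag (objective: simpler, one pass).


-- ===== PORT A =====
-- Literal port of A; string indexing via PySem.List.pyGetD on .toList (in range under Pre_),
-- result built as a List Char, split(' ') = PySem.Chars.splitOn, 'BB' in w = PySem.Chars.isIn.
def search_for_ugly_words (len_str : Int) (right_str : String) (left_str : String) : Int :=
  let result : List Char :=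
    (PySem.List.pyRange 0 len_str 1).foldl (fun acc i =>
      if PySem.List.pyGetD right_str.toList i ' ' = ' ' then
        acc ++ [PySem.List.pyGetD right_str.toList i ' ']
      else
        acc ++ [PySem.List.pyGetD left_str.toList i ' ']) []
  let list_result := PySem.Chars.splitOn result [' ']
  (PySem.List.pyRange 0 (list_result.length : Int) 1).foldl (fun count i =>
    if PySem.Chars.isIn ['B','B'] (PySem.List.pyGetD list_result i []) then count + 1
    else if PySem.Chars.isIn ['Y','Y'] (PySem.List.pyGetD list_result i []) then count + 1
    else count + 0) 0

-- ===== PORT B =====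
-- Literal port of B (Source B): state = (count, flag, prev), finalized after the loop.
def search_for_ugly_words_alt (len_str : Int) (right_str : String) (left_str : String) : Int :=
  let st : Int × Bool × Option Char :=
    (PySem.List.pyRange 0 len_str 1).foldl (fun st i =>
      let c : Char := if PySem.List.pyGetD right_str.toList i ' ' = ' ' then ' '
                      else PySem.List.pyGetD left_str.toList i ' '
      if c = ' ' then
        ((if st.2.1 then st.1 + 1 else st.1), false, none)
      else
        (st.1, (if st.2.2 = some c ∧ (c = 'B' ∨ c = 'Y') then true else st.2.1), some c))
      (0, false, none)
  if st.2.1 then st.1 + 1 else st.1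

-- ===== PRECONDITION & SPEC =====
-- Pre_: exactly the inputs where Python A raises no IndexError: every i in range(len_str)
-- is a valid index into right_str, and into left_str whenever right_str[i] != ' '.
def Pre_search_for_ugly_words (len_str : Int) (right_str : String) (left_str : String) : Prop :=
  len_str.toNat ≤ right_str.toList.length ∧
    ∀ i : Nat, i < right_str.toList.length → i < len_str.toNat →
      right_str.toList[i]? ≠ some ' ' → i < left_str.toList.length
instance (len_str : Int) (right_str : String) (left_str : String) : Decidable (Pre_search_for_ugly_words len_str right_str left_str) := by unfold Pre_search_for_ugly_words; infer_instance
def pvWitness_search_for_ugly_words : Int × String × String := (5, "BB YY", "BBXYY")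

def Spec_search_for_ugly_words (len_str : Int) (right_str : String) (left_str : String) (out : Int) : Prop := out = search_for_ugly_words_alt len_str right_str left_str
instance (len_str : Int) (right_str : String) (left_str : String) (out : Int) : Decidable (Spec_search_for_ugly_words len_str right_str left_str out) := by unfold Spec_search_for_ugly_words; infer_instance

-- ===== CLAIM (what is proved, stated in full; the proofs are below) =====
def Claim_equal_search_for_ugly_words : Prop := ∀ (len_str : Int) (right_str : String) (left_str : String), Dom_search_for_ugly_words len_str right_str left_str → Pre_search_for_ugly_words len_str right_str left_str → Spec_search_for_ugly_words len_str right_str left_str (search_for_ugly_words len_str right_str left_str)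

-- ===== LEMMAS AND PROOFS =====

-- the merged character at index i (both ports compute exactly this)
def pvMerge (R L : List Char) (i : Int) : Char :=
  if PySem.List.pyGetD R i ' ' = ' ' then ' ' else PySem.List.pyGetD L i ' '

-- A's per-word contribution, and "the word contains BB or YY" as a Bool
def pvContrib (w : List Char) : Int :=
  if PySem.Chars.isIn ['B','B'] w then 1 else if PySem.Chars.isIn ['Y','Y'] w then 1 else 0

def pvUgly (w : List Char) : Bool :=
  PySem.Chars.isIn ['B','B'] w || PySem.Chars.isIn ['Y','Y'] w

-- B's loop body as a function of the merged character
def pvStep (st : Int × Bool × Option Char) (c : Char) : Int × Bool × Option Char :=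
  if c = ' ' then ((if st.2.1 then st.1 + 1 else st.1), false, none)
  else (st.1, (if st.2.2 = some c ∧ (c = 'B' ∨ c = 'Y') then true else st.2.1), some c)

lemma pv_modifyHead_id {α : Type} (l : List α) : List.modifyHead (fun x => x) l = l := by
  cases l <;> rfl

-- PySem's fuel-based splitOn with separator [' '] is List.splitOnP (· == ' ')
lemma pv_go_spec (fuel : Nat) : ∀ (l cur : List Char) (acc : List (List Char)),
    l.length ≤ fuel →
    PySem.Chars.splitOn.go [' '] fuel l cur acc
      = acc.reverse ++ (l.splitOnP (· == ' ')).modifyHead (cur.reverse ++ ·) := by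
  induction fuel with
  | zero =>
    intro l cur acc h
    have : l = [] := List.eq_nil_of_length_eq_zero (Nat.le_zero.mp h)
    subst this
    simp [PySem.Chars.splitOn.go, List.splitOnP_nil]
  | succ n ih =>
    intro l cur acc h
    cases l with
    | nil => simp [PySem.Chars.splitOn.go, List.splitOnP_nil]
    | cons c rest =>
      rw [PySem.Chars.splitOn.go]
      by_cases hc : c = ' '
      · subst hc
        simp only [List.splitOnP_cons]
        rw [if_pos (by simp [List.isPrefixOf])]
        rw [ih _ _ _ (by simpa using Nat.le_of_succ_le_succ h)]
        simp [List.modifyHead]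
        cases List.splitOnP (fun x => x == ' ') rest <;> rfl
      · rw [if_neg (by simp [List.isPrefixOf]; exact fun h => absurd h.symm hc)]
        rw [ih _ _ _ (by simpa using Nat.le_of_succ_le_succ h)]
        simp [List.splitOnP_cons, hc]
        rfl

lemma pv_splitOn_eq (m : List Char) :
    PySem.Chars.splitOn m [' '] = m.splitOnP (· == ' ') := by
  unfold PySem.Chars.splitOn
  rw [pv_go_spec _ _ _ _ (by omega)]
  simp only [List.reverse_nil, List.nil_append]
  exact pv_modifyHead_id _

-- [x,x] is an infix of w ++ [c] iff it already is in w, or c equals x and extends a final x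
lemma pv_infix_pair_append (w : List Char) (c x : Char) :
    ([x,x] <:+: w ++ [c]) ↔ ([x,x] <:+: w ∨ (c = x ∧ w.getLast? = some x)) := by
  induction w with
  | nil =>
    constructor
    · intro h
      have := h.length_le
      simp at this
    · rintro (h | ⟨h1, h2⟩)
      · exact absurd h.length_le (by simp)
      · simp at h2
  | cons a w ih =>
    rw [List.cons_append, List.infix_cons_iff, List.infix_cons_iff, ih]
    cases w with
    | nil =>
      simp [List.prefix_cons_iff]
      constructor
      · rintro ⟨h1, h2⟩; exact ⟨h2.symm, h1.symm⟩
      · rintro ⟨h1, h2⟩; exact ⟨h2.symm, h1.symm⟩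
    | cons b w' =>
      simp [List.prefix_cons_iff]
      tauto

lemma pv_ugly_append (w : List Char) (c : Char) :
    pvUgly (w ++ [c])
      = (if w.getLast? = some c ∧ (c = 'B' ∨ c = 'Y') then true else pvUgly w) := by
  rw [Bool.eq_iff_iff]
  split_ifs with h
  · rcases h with ⟨h1, h2 | h2⟩ <;> subst h2 <;>
      simp [pvUgly, PySem.Chars.isIn_iff_infix, pv_infix_pair_append] <;> tauto
  · simp only [pvUgly, Bool.or_eq_true, PySem.Chars.isIn_iff_infix,
      pv_infix_pair_append]
    constructor
    · rintro ((h1 | ⟨h1, h2⟩) | (h1 | ⟨h1, h2⟩))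
      · tauto
      · subst h1; exact absurd ⟨h2, Or.inl rfl⟩ h
      · tauto
      · subst h1; exact absurd ⟨h2, Or.inr rfl⟩ h
    · tauto

lemma pv_contrib_eq (w : List Char) : pvContrib w = if pvUgly w then 1 else 0 := by
  unfold pvContrib pvUgly
  by_cases h1 : PySem.Chars.isIn ['B','B'] w <;>
    by_cases h2 : PySem.Chars.isIn ['Y','Y'] w <;> simp [h1, h2]

-- the scan invariant: B's state summarizes the word read so far
lemma pv_scan_spec (m : List Char) : ∀ (cnt : Int) (w : List Char),
    (let st := m.foldl pvStep (cnt, pvUgly w, w.getLast?)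
     (if st.2.1 then st.1 + 1 else st.1))
      = cnt + (((m.splitOnP (· == ' ')).modifyHead (w ++ ·)).map pvContrib).sum := by
  induction m with
  | nil =>
    intro cnt w
    simp [List.splitOnP_nil, pv_contrib_eq]
    split_ifs <;> simp
  | cons c m ih =>
    intro cnt w
    simp only [List.foldl_cons]
    by_cases hc : c = ' '
    · subst hc
      have hstep : pvStep (cnt, pvUgly w, w.getLast?) ' '
          = ((if pvUgly w then cnt + 1 else cnt), pvUgly [], ([] : List Char).getLast?) := by
        simp [pvStep, pvUgly]; exact ⟨by decide, by decide⟩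
      rw [hstep, ih]
      simp [List.splitOnP_cons, pv_contrib_eq]
      split_ifs <;>
        (cases List.splitOnP (fun x => x == ' ') m <;> simp [List.modifyHead] <;> ring)
    · have hstep : pvStep (cnt, pvUgly w, w.getLast?) c
          = (cnt, pvUgly (w ++ [c]), (w ++ [c]).getLast?) := by
        simp [pvStep, hc, pv_ugly_append]
      rw [hstep, ih]
      congr 1
      rw [List.splitOnP_cons, if_neg (by simpa using hc)]
      cases List.splitOnP (fun x => x == ' ') m <;> simp [List.modifyHead]

-- A's counting loop over the word list is the sum of the contributions
lemma pv_count_eq (l : List (List Char)) : ∀ (a : Int),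
    l.foldl (fun count w =>
      if PySem.Chars.isIn ['B','B'] w then count + 1
      else if PySem.Chars.isIn ['Y','Y'] w then count + 1
      else count + 0) a
      = a + (l.map pvContrib).sum := by
  induction l with
  | nil => intro a; simp
  | cons w l ih =>
    intro a
    simp only [List.foldl_cons, List.map_cons, List.sum_cons, ih]
    unfold pvContrib
    split_ifs <;> ring

-- ===== VERDICT (by name: the statement is the Claim_ definition above) =====
theorem search_for_ugly_words_spec : Claim_equal_search_for_ugly_words := by
  intro len_str right_str left_str _ _
  unfold Spec_search_for_ugly_words
  simp only [search_for_ugly_words, search_for_ugly_words_alt]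
  have hbodyA : (fun (acc : List Char) (i : Int) =>
      if PySem.List.pyGetD right_str.toList i ' ' = ' ' then
        acc ++ [PySem.List.pyGetD right_str.toList i ' ']
      else
        acc ++ [PySem.List.pyGetD left_str.toList i ' '])
      = fun acc i => acc ++ [pvMerge right_str.toList left_str.toList i] := by
    funext acc i
    unfold pvMerge
    split_ifs with h
    · rw [h]
    · rfl
  rw [hbodyA, PySem.List.foldl_append_singleton_eq_map, List.nil_append, pv_splitOn_eq]
  rw [PySem.List.foldl_pyRange_zero_pyGetD'
    (((PySem.List.pyRange 0 len_str 1).map (pvMerge right_str.toList left_str.toList)).splitOnP (· == ' ')) []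
    (fun count w =>
      if PySem.Chars.isIn ['B','B'] w then count + 1
      else if PySem.Chars.isIn ['Y','Y'] w then count + 1
      else count + 0) 0]
  rw [pv_count_eq]
  have hbodyB : (fun (st : Int × Bool × Option Char) (i : Int) =>
      let c : Char := if PySem.List.pyGetD right_str.toList i ' ' = ' ' then ' '
                      else PySem.List.pyGetD left_str.toList i ' '
      if c = ' ' then
        ((if st.2.1 then st.1 + 1 else st.1), false, none)
      else
        (st.1, (if st.2.2 = some c ∧ (c = 'B' ∨ c = 'Y') then true else st.2.1), some c))
      = fun st i => pvStep st (pvMerge right_str.toList left_str.toList i) := rfl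
  rw [hbodyB, ← List.foldl_map (f := pvMerge right_str.toList left_str.toList) (g := pvStep)]
  have hinit : ((0 : Int), false, (none : Option Char))
      = (0, pvUgly [], ([] : List Char).getLast?) := by
    refine by simp; decide
  rw [hinit, pv_scan_spec]
  simp only [List.nil_append, zero_add]
  rw [pv_modifyHead_id]
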